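-- pv_equiv track=rewrite | github.com/laisuk/OpenccPurepyGui | mainwindow.py | collapse_repeated_token
-- ===== SOURCE A (Python) =====
-- def collapse_repeated_token(token: str) -> str:
--     """
--     Collapse repeated subunit patterns inside a token.
--
--     Python port of the C# CollapseRepeatedToken:
--     - Ignore very short (<4) or very long (>200) tokens.
--     - Try repeating unit lengths between 2 and 20.
--     - Detect tokens made entirely of repeated units.
--     - Collapse to a single unit.
--     """
--     length = len(token)
--
--     # Very short or very large tokens are not treated as repeated patterns
--     if length < 4 or length > 200:
--         return token
--
--     # Try unit sizes between 2 and 20 chars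
--     for unit_len in range(2, 21):
--         if unit_len > length // 2:
--             break
--
--         if length % unit_len != 0:
--             continue
--
--         unit = token[:unit_len]
--         # Check if token is made entirely of repeated unit
--         repeat_count = length // unit_len
--
--         if unit * repeat_count == token:
--             return unit  # collapse
--
--     return token
-- ===== SOURCE B (Python) =====
-- def collapse_repeated_token(token: str) -> str:
--     """Collapse repeated subunit patterns via the minimal rotation period
--     computed once with (token+token).find(token, 1)."""
--     n = len(token)
--     if n < 4 or n > 200:
--         return token
--     p = (token + token).find(token, 1)  # minimal rotation period of token
--     if p >= 2:
--         return token[:p] if (p <= 20 and 2 * p <= n and n % p == 0) else token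
--     # p == 1: uniform-character token; smallest allowed unit length that divides n
--     for d in range(2, 21):
--         if n % d == 0 and 2 * d <= n:
--             return token[0] * d
--     return token
-- ===== Notes on version B (the rewrite author's own statement) =====
-- stated objective: alternative
-- what changed: Instead of trying every unit length 2..20 and building unit*repeat_count for each divisor, B computes the minimal rotation period once via (token+token).find(token,1) and decides directly from it; only the uniform-character case (period 1) keeps a small divisor search.
import Mathlib
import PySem

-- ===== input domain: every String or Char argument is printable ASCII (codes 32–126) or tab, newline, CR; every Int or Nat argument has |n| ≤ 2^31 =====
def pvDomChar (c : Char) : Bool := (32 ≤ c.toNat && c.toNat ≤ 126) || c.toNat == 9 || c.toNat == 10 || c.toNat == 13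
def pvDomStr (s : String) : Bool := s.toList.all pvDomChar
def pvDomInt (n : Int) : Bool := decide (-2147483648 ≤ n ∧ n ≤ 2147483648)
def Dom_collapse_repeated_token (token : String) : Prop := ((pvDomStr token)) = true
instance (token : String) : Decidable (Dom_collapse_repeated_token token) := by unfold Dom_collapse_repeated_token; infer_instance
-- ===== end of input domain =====

-- B replaces A's scan over candidate unit lengths by ONE minimal-rotation-period computation
-- ((token+token).find(token, 1)); objective: alternative (different algorithm, similar cost).

-- ===== PORT A =====
-- the for-loop over range(2, 21): `none` = fell through / broke out (Python then returns token),
-- `some unit` = the early `return unit`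
def collapseLoopA (t : List Char) (length : Int) : List Int → Option (List Char)
  | [] => none
  | u :: rest =>
    if PySem.Int.floordiv length 2 < u then none          -- break
    else if ¬ PySem.Int.mod length u = 0 then collapseLoopA t length rest  -- continue
    else if PySem.List.pyRepeat (PySem.List.slice t none (some u)) (PySem.Int.floordiv length u) = t
      then some (PySem.List.slice t none (some u))        -- unit * repeat_count == token: return unit
      else collapseLoopA t length rest

def collapse_repeated_token (token : String) : String :=
  let t := token.toList
  let length := PySem.Str.len token
  if length < 4 ∨ 200 < length then token
  else
    match collapseLoopA t length (PySem.List.pyRange 2 21) with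
    | some unit => String.ofList unit
    | none => token

-- ===== PORT B =====
-- the for-loop over range(2, 21) of B's uniform-character branch; `some s` = `return token[0] * d`
def collapseDivLoopB (t : List Char) (n : Int) : List Int → Option (List Char)
  | [] => none
  | d :: rest =>
    if PySem.Int.mod n d = 0 ∧ 2 * d ≤ n then
      some (match PySem.List.pyGet? t 0 with               -- token[0]; `none` unreachable: n ≥ 4
            | some c => PySem.List.pyRepeat [c] d
            | none => [])
    else collapseDivLoopB t n rest

def collapse_repeated_token_alt (token : String) : String :=
  let t := token.toList
  let n := PySem.Str.len token
  if n < 4 ∨ 200 < n then token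
  else
    let p := PySem.Chars.findFrom (t ++ t) t 1            -- (token+token).find(token, 1)
    if 2 ≤ p then
      if p ≤ 20 ∧ 2 * p ≤ n ∧ PySem.Int.mod n p = 0 then
        String.ofList (PySem.List.slice t none (some p))  -- token[:p]
      else token
    else
      match collapseDivLoopB t n (PySem.List.pyRange 2 21) with
      | some s => String.ofList s
      | none => token

-- ===== PRECONDITION & SPEC =====
def Spec_collapse_repeated_token (token : String) (out : String) : Prop := out = collapse_repeated_token_alt token
instance (token : String) (out : String) : Decidable (Spec_collapse_repeated_token token out) := by unfold Spec_collapse_repeated_token; infer_instance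

-- ===== CLAIM (what is proved, stated in full; the proofs are below) =====
def Claim_equal_collapse_repeated_token : Prop := ∀ (token : String), Dom_collapse_repeated_token token → Spec_collapse_repeated_token token (collapse_repeated_token token)

-- ===== LEMMAS AND PROOFS =====

-- Int/Nat bridges
theorem pv_mod_cast (N m : ℕ) : PySem.Int.mod (↑N) (↑m) = ↑(N % m) := by
  simp [PySem.Int.mod, Int.fmod_eq_emod]

theorem pv_floordiv_cast (N m : ℕ) : PySem.Int.floordiv (↑N) (↑m) = ↑(N / m) := by
  rw [PySem.Int.floordiv, Int.fdiv_eq_ediv]; omega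

-- occurrence of t inside t++t at i ≤ n is exactly a rotation fixing t
theorem pv_prefix_drop_iff_rotate (t : List Char) (i : ℕ) (hi : i ≤ t.length) :
    (t <+: (t ++ t).drop i) ↔ t.rotate i = t := by
  rw [List.drop_append_of_le_length hi, List.prefix_iff_eq_take]
  have htake : List.take t.length (t.drop i ++ t) = t.drop i ++ List.take i t := by
    rw [List.take_append, List.take_of_length_le (by simp), List.length_drop]
    congr 2
    omega
  rw [htake, List.rotate_eq_drop_append_take hi]
  exact eq_comm

-- rotation by a multiple of a fixing index still fixes
theorem pv_rotate_mul (t : List Char) (P q : ℕ) (h : t.rotate P = t) : t.rotate (q * P) = t := by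
  induction q with
  | zero => simp
  | succ q ih => rw [Nat.succ_mul, ← List.rotate_rotate, ih, h]

-- the commutation c ++ (replicate k c).flatten = (replicate k c).flatten ++ c
theorem pv_flatten_comm (c : List Char) (k : ℕ) :
    (List.replicate k c).flatten ++ c = c ++ (List.replicate k c).flatten := by
  induction k with
  | zero => simp
  | succ k ih => simp only [List.replicate_succ, List.flatten_cons, List.append_assoc, ih]

-- a nonempty flatten of replicates is fixed by rotating one block
theorem pv_rotate_flatten (c : List Char) (m : ℕ) (hm : 0 < m) :
    ((List.replicate m c).flatten).rotate c.length = (List.replicate m c).flatten := by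
  obtain ⟨k, rfl⟩ : ∃ k, m = k + 1 := ⟨m - 1, by omega⟩
  have h1 : (List.replicate (k + 1) c).flatten = c ++ (List.replicate k c).flatten := by
    simp [List.replicate_succ]
  rw [h1, List.rotate_eq_drop_append_take (by simp), List.drop_left, List.take_left]
  exact pv_flatten_comm c k

-- conversely a rotation-fixed list of length k*u is a flatten of replicates of its u-prefix
theorem pv_build_of_rotate (u : ℕ) (hu : 0 < u) :
    ∀ (k : ℕ) (t : List Char), t.length = k * u → t.rotate u = t →
      t = (List.replicate k (t.take u)).flatten := by
  intro k
  induction k with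
  | zero =>
    intro t h _
    rw [Nat.zero_mul] at h
    simp [List.eq_nil_of_length_eq_zero h]
  | succ k ih =>
    intro t hlen hrot
    have hmul : (k + 1) * u = k * u + u := by ring
    have hu_le : u ≤ t.length := by omega
    have hab : t = t.take u ++ t.drop u := (List.take_append_drop u t).symm
    have hla : (t.take u).length = u := by simp; omega
    have hlb : (t.drop u).length = k * u := by simp; omega
    have hba : t.drop u ++ t.take u = t := by
      rw [← List.rotate_eq_drop_append_take hu_le]; exact hrot
    by_cases hk : k = 0
    · subst hk
      have hb : t.drop u = [] := List.eq_nil_of_length_eq_zero (by simpa using hlb)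
      conv_lhs => rw [hab, hb]
      simp
    · have hub : u ≤ (t.drop u).length := by
        have : 1 * u ≤ k * u := Nat.mul_le_mul_right u (Nat.one_le_iff_ne_zero.mpr hk)
        omega
      have htb : (t.drop u).take u = t.take u := by
        have h1 : (t.drop u ++ t.take u).take u = (t.drop u).take u :=
          List.take_append_of_le_length hub
        have h2 : (t.take u ++ t.drop u).take u = t.take u := List.take_left' hla
        rw [hba] at h1
        rw [← hab] at h2
        rw [← h1, h2]
    
      have hdb : (t.drop u).drop u ++ t.take u = t.drop u := by
        have h1 : (t.drop u ++ t.take u).drop u = (t.drop u).drop u ++ t.take u :=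
          List.drop_append_of_le_length hub
        have h2 : (t.take u ++ t.drop u).drop u = t.drop u := List.drop_left' hla
        rw [hba] at h1
        rw [← hab] at h2
        rw [← h1, h2]
      have hrb : (t.drop u).rotate u = t.drop u := by
        rw [List.rotate_eq_drop_append_take hub, htb, hdb]
      have hrec := ih (t.drop u) hlb hrb
      rw [htb] at hrec
      conv_lhs => rw [hab, hrec]
      simp [List.replicate_succ]

-- a list fixed by rotate 1 is constant
theorem pv_const_of_rotate_one (t : List Char) (ht : t ≠ []) (h : t.rotate 1 = t) :
    t = List.replicate t.length t.headI := by
  cases t with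
  | nil => exact absurd rfl ht
  | cons c s =>
    have h' : s ++ [c] = c :: s := by
      have h2 := List.rotate_eq_drop_append_take (l := c :: s) (n := 1) (by simp)
      simp only [List.drop_one, List.take_one] at h2
      rw [h] at h2
      simpa using h2.symm
    have key : ∀ s' : List Char, s' ++ [c] = c :: s' → s' = List.replicate s'.length c := by
      intro s'
      induction s' with
      | nil => simp
      | cons d s'' ih =>
        intro hh
        simp only [List.cons_append, List.cons.injEq] at hh
        obtain ⟨rfl, hh2⟩ := hh
        have := ih hh2
        simp [List.replicate_succ, ← this]
    have hs := key s h'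
    simp only [List.headI, List.length_cons, List.replicate_succ]
    exact congrArg (c :: ·) hs

theorem pv_flat_rep_rep (c : Char) (k m : ℕ) :
    (List.replicate k (List.replicate m c)).flatten = List.replicate (k * m) c := by
  induction k with
  | zero => simp
  | succ k ih =>
    simp only [List.replicate_succ, List.flatten_cons, ih, Nat.succ_mul]
    rw [Nat.add_comm, List.replicate_append_replicate]

-- the "hit" test of A, for u ∣ N, is exactly `t.rotate u = t`
theorem pv_hit_iff_rotate (t : List Char) (u : ℕ) (hu : 0 < u) (hdvd : u ∣ t.length)
    (hN : 0 < t.length) :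
    (PySem.List.pyRepeat (PySem.List.slice t none (some (↑u))) (PySem.Int.floordiv (↑t.length) (↑u)) = t)
      ↔ t.rotate u = t := by
  obtain ⟨k, hk⟩ := hdvd
  have huN : u ≤ t.length := Nat.le_of_dvd hN ⟨k, hk⟩
  rw [PySem.List.slice_to_natCast, pv_floordiv_cast]
  simp only [PySem.List.pyRepeat, Int.toNat_natCast]
  have hdivk : t.length / u = k := by rw [hk]; exact Nat.mul_div_cancel_left k hu
  rw [hdivk]
  constructor
  · intro hfl
    have hlen_take : (t.take u).length = u := by simp; omega
    have hk0 : 0 < k := by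
      rcases Nat.eq_zero_or_pos k with h | h
      · rw [h, Nat.mul_zero] at hk; omega
      · exact h
    have hr := pv_rotate_flatten (t.take u) k hk0
    rw [hfl, hlen_take] at hr
    exact hr
  · intro hrot
    exact (pv_build_of_rotate u hu k t (by rw [hk]; ring) hrot).symm

-- ===== facts about p = (t++t).find(t, 1) =====

theorem pv_find_spec (t : List Char) (ht : t ≠ []) :
    1 ≤ PySem.Chars.findFrom (t ++ t) t 1 ∧
    (PySem.Chars.findFrom (t ++ t) t 1).toNat ≤ t.length ∧
    t.rotate (PySem.Chars.findFrom (t ++ t) t 1).toNat = t ∧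
    (∀ i : ℕ, 1 ≤ i → i < (PySem.Chars.findFrom (t ++ t) t 1).toNat → ¬ t.rotate i = t) := by
  have htpos : 0 < t.length := List.length_pos_of_ne_nil ht
  have hlen : 1 ≤ (t ++ t).length := by simp; omega
  have hne : PySem.Chars.findFrom (t ++ t) t 1 ≠ -1 := by
    have hiff := PySem.Chars.findFrom_natCast_eq_neg_one_iff (t ++ t) t 1 hlen
    simp only [Nat.cast_one] at hiff
    intro heq
    apply hiff.mp heq
    refine List.IsSuffix.isInfix ?_
    rw [List.drop_append_of_le_length (by omega)]
    exact List.suffix_append _ _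
  have hspec := PySem.Chars.findFrom_natCast_spec (t ++ t) t 1 hlen (by simpa using hne)
  simp only [Nat.cast_one] at hspec
  obtain ⟨hge, hpre, hmin⟩ := hspec
  have hP1 : 1 ≤ (PySem.Chars.findFrom (t ++ t) t 1).toNat := by omega
  have hPle : (PySem.Chars.findFrom (t ++ t) t 1).toNat ≤ t.length := by
    by_contra hgt
    exact hmin t.length (by omega) (by omega)
      (by rw [List.drop_left])
  refine ⟨hge, hPle, ?_, ?_⟩
  · exact (pv_prefix_drop_iff_rotate t _ hPle).mp hpre
  · intro i hi1 hiP hrot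
    exact hmin i hi1 hiP ((pv_prefix_drop_iff_rotate t i (by omega)).mpr hrot)

-- minimality gives divisibility for every rotation-fixing index
theorem pv_period_dvd (t : List Char) (P : ℕ) (hP : 0 < P) (hPt : t.rotate P = t)
    (hmin : ∀ i : ℕ, 1 ≤ i → i < P → ¬ t.rotate i = t) (hPle : P ≤ t.length)
    (u : ℕ) (hu : t.rotate u = t) : P ∣ u := by
  have h0 : t.rotate (u / P * P) = t := pv_rotate_mul t P (u / P) hPt
  have h1 : t.rotate (u % P) = t := by
    have hrr := List.rotate_rotate t (u / P * P) (u % P)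
    rw [h0] at hrr
    have he : u / P * P + u % P = u := by rw [Nat.mul_comm]; exact Nat.div_add_mod u P
    rw [hrr, he]
    exact hu
  rcases Nat.eq_zero_or_pos (u % P) with h | h
  · exact Nat.dvd_of_mod_eq_zero h
  · exact absurd h1 (hmin _ h (Nat.mod_lt u hP))

-- ===== loop characterisations =====

theorem pv_loopA_none (t : List Char) (N : ℕ) (L : List Int)
    (h : ∀ u ∈ L, PySem.Int.floordiv (↑N) 2 < u ∨ ¬ PySem.Int.mod (↑N) u = 0 ∨
        ¬ PySem.List.pyRepeat (PySem.List.slice t none (some u)) (PySem.Int.floordiv (↑N) u) = t) :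
    collapseLoopA t (↑N) L = none := by
  induction L with
  | nil => rfl
  | cons u rest ih =>
    rcases h u (by simp) with h1 | h1 | h1 <;>
      (simp only [collapseLoopA]; split_ifs with g1 g2) <;>
        first
        | rfl
        | (exact ih fun v hv => h v (by simp [hv]))
        | (exact absurd ‹_› h1)

theorem pv_loopA_hit (t : List Char) (N : ℕ) (u : Int) (L1 L2 : List Int)
    (h1 : ∀ v ∈ L1, ¬ PySem.Int.floordiv (↑N) 2 < v ∧
        (¬ PySem.Int.mod (↑N) v = 0 ∨
         ¬ PySem.List.pyRepeat (PySem.List.slice t none (some v)) (PySem.Int.floordiv (↑N) v) = t))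
    (hstop : ¬ PySem.Int.floordiv (↑N) 2 < u) (hskip : PySem.Int.mod (↑N) u = 0)
    (hhit : PySem.List.pyRepeat (PySem.List.slice t none (some u)) (PySem.Int.floordiv (↑N) u) = t) :
    collapseLoopA t (↑N) (L1 ++ u :: L2) = some (PySem.List.slice t none (some u)) := by
  induction L1 with
  | nil => simp only [List.nil_append, collapseLoopA]; split_ifs <;> tauto
  | cons v L1 ih =>
    have hv := h1 v (by simp)
    simp only [List.cons_append, collapseLoopA]
    split_ifs with g1 g2 g3
    · exact absurd g1 hv.1
    · rcases hv.2 with h | h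
      · exact absurd g2 h
      · exact absurd g3 h
    · exact ih fun w hw => h1 w (by simp [hw])
    · exact ih fun w hw => h1 w (by simp [hw])

theorem pv_loopB_none (t : List Char) (N : ℕ) (L : List Int)
    (h : ∀ d ∈ L, ¬ (PySem.Int.mod (↑N) d = 0 ∧ 2 * d ≤ (↑N : Int))) :
    collapseDivLoopB t (↑N) L = none := by
  induction L with
  | nil => rfl
  | cons d rest ih =>
    simp only [collapseDivLoopB]
    split_ifs with g
    · exact absurd g (h d (by simp))
    · exact ih fun v hv => h v (by simp [hv])

-- ===== the uniform-character case: the two loops agree =====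
theorem pv_uniform_loops (c : Char) (N : ℕ) (hN : 4 ≤ N) :
    ∀ L : List Int, (∀ u ∈ L, 2 ≤ u) → L.Pairwise (· ≤ ·) →
      collapseLoopA (List.replicate N c) (↑N) L = collapseDivLoopB (List.replicate N c) (↑N) L := by
  intro L
  induction L with
  | nil => intro _ _; rfl
  | cons u rest ih =>
    intro h2 hpw
    have hu2 : 2 ≤ u := h2 u (by simp)
    obtain ⟨m, rfl⟩ : ∃ m : ℕ, u = ↑m := ⟨u.toNat, (Int.toNat_of_nonneg (by omega)).symm⟩
    have hm2 : 2 ≤ m := by exact_mod_cast hu2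
    have hfd : PySem.Int.floordiv (↑N) 2 = ((N / 2 : ℕ) : ℤ) := by
      exact_mod_cast pv_floordiv_cast N 2
    simp only [collapseLoopA, collapseDivLoopB]
    by_cases hstop : PySem.Int.floordiv (↑N) 2 < (m : ℤ)
    · rw [if_pos hstop]
      have hN2m : N < 2 * m := by
        rw [hfd] at hstop
        have : N / 2 < m := by exact_mod_cast hstop
        omega
      rw [if_neg (by push_cast; omega)]
      symm
      apply pv_loopB_none
      intro d hd
      have hud : (m : ℤ) ≤ d := (List.pairwise_cons.mp hpw).1 d hd
      rintro ⟨-, hdl⟩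
      have : 2 * (m : ℤ) ≤ ↑N := by omega
      push_cast at this
      omega
    · rw [if_neg hstop]
      have hm_le : 2 * m ≤ N := by
        rw [hfd] at hstop
        have : ¬ ((N / 2 : ℕ) : ℤ) < (m : ℤ) := hstop
        have h' : m ≤ N / 2 := by exact_mod_cast not_lt.mp this
        omega
      by_cases hdvd : PySem.Int.mod (↑N) (m : ℤ) = 0
      · have hmodn : N % m = 0 := by
          rw [pv_mod_cast] at hdvd
          exact_mod_cast hdvd
        have hdvd' : m ∣ N := Nat.dvd_of_mod_eq_zero hmodn
        rw [if_neg (not_not_intro hdvd)]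
        have hmin : min m N = m := by omega
        have hhit : PySem.List.pyRepeat (PySem.List.slice (List.replicate N c) none (some (m : ℤ)))
            (PySem.Int.floordiv (↑N) (m : ℤ)) = List.replicate N c := by
          rw [PySem.List.slice_to_natCast, pv_floordiv_cast]
          simp only [PySem.List.pyRepeat, Int.toNat_natCast]
          rw [List.take_replicate, hmin, pv_flat_rep_rep, Nat.div_mul_cancel hdvd']
        rw [if_pos hhit, if_pos ⟨hdvd, by push_cast; omega⟩]
        have hp0 : PySem.List.pyGet? (List.replicate N c) (0 : ℤ) = some c := by
          rw [show (0 : ℤ) = ((0 : ℕ) : ℤ) by simp, PySem.List.pyGet?_natCast]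
          simp only [List.getElem?_replicate]
          rw [if_pos (by omega)]
        rw [hp0, PySem.List.slice_to_natCast, List.take_replicate, hmin]
        simp [PySem.List.pyRepeat_singleton]
      · rw [if_pos hdvd, if_neg (fun h => hdvd h.1)]
        exact ih (fun v hv => h2 v (by simp [hv])) (List.pairwise_cons.mp hpw).2

-- ===== main theorem =====
theorem pv_main (token : String) : collapse_repeated_token token = collapse_repeated_token_alt token := by
  simp only [collapse_repeated_token, collapse_repeated_token_alt]
  by_cases hguard : PySem.Str.len token < 4 ∨ 200 < PySem.Str.len token
  · rw [if_pos hguard, if_pos hguard]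
  · rw [if_neg hguard, if_neg hguard]
    generalize htt : token.toList = t
    have hlen : PySem.Str.len token = ↑t.length := by rw [PySem.Str.len, htt]
    rw [hlen] at hguard ⊢
    have hN4 : 4 ≤ t.length := by push_cast at hguard; omega
    have htne : t ≠ [] := by intro h; rw [h] at hN4; simp at hN4
    obtain ⟨hf1, hPle, hProt, hPmin⟩ := pv_find_spec t htne
    have hfP : PySem.Chars.findFrom (t ++ t) t 1 = ↑(PySem.Chars.findFrom (t ++ t) t 1).toNat :=
      (Int.toNat_of_nonneg (by omega)).symm
    set P := (PySem.Chars.findFrom (t ++ t) t 1).toNat with hPdef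
    have hP1 : 1 ≤ P := by omega
    by_cases hp2 : 2 ≤ PySem.Chars.findFrom (t ++ t) t 1
    · rw [if_pos hp2]
      have hP2 : 2 ≤ P := by omega
      by_cases hgood : P ≤ 20 ∧ 2 * P ≤ t.length ∧ P ∣ t.length
      · obtain ⟨hg1, hg2, hg3⟩ := hgood
        have hmodP : t.length % P = 0 := Nat.mod_eq_zero_of_dvd hg3
        have hcond : PySem.Chars.findFrom (t ++ t) t 1 ≤ 20 ∧
            2 * PySem.Chars.findFrom (t ++ t) t 1 ≤ (↑t.length : ℤ) ∧
            PySem.Int.mod (↑t.length) (PySem.Chars.findFrom (t ++ t) t 1) = 0 := by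
          rw [hfP]
          refine ⟨by exact_mod_cast hg1, by push_cast; omega, ?_⟩
          rw [pv_mod_cast, hmodP]
          rfl
        rw [if_pos hcond]
        have hsplit : PySem.List.pyRange 2 21 =
            PySem.List.pyRange 2 (↑P) ++ (↑P : ℤ) :: PySem.List.pyRange (↑P + 1) 21 := by
          rw [PySem.List.pyRange_one_append 2 (↑P) 21 (by exact_mod_cast hP2) (by push_cast; omega)]
          congr 1
          exact PySem.List.pyRange_one_cons (by push_cast; omega)
        have hA : collapseLoopA t (↑t.length) (PySem.List.pyRange 2 21) =
            some (PySem.List.slice t none (some (↑P : ℤ))) := by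
          rw [hsplit]
          apply pv_loopA_hit
          · intro v hv
            rw [PySem.List.mem_pyRange_one] at hv
            obtain ⟨m, rfl⟩ : ∃ m : ℕ, v = ↑m := ⟨v.toNat, (Int.toNat_of_nonneg (by omega)).symm⟩
            have hm2 : 2 ≤ m := by exact_mod_cast hv.1
            have hmP : m < P := by exact_mod_cast hv.2
            constructor
            · rw [show (PySem.Int.floordiv (↑t.length) 2) = ((t.length / 2 : ℕ) : ℤ) from by
                exact_mod_cast pv_floordiv_cast t.length 2]
              push_cast
              omega
            · by_cases hmod : PySem.Int.mod (↑t.length) (↑m : ℤ) = 0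
              · right
                intro hhit
                have hmd : m ∣ t.length := by
                  rw [pv_mod_cast] at hmod
                  exact Nat.dvd_of_mod_eq_zero (by exact_mod_cast hmod)
                have hrot := (pv_hit_iff_rotate t m (by omega) hmd (by omega)).mp hhit
                exact hPmin m (by omega) hmP hrot
              · left; exact hmod
          · rw [show (PySem.Int.floordiv (↑t.length) 2) = ((t.length / 2 : ℕ) : ℤ) from by
              exact_mod_cast pv_floordiv_cast t.length 2]
            push_cast
            omega
          · rw [pv_mod_cast, hmodP]; rfl
          · exact (pv_hit_iff_rotate t P (by omega) hg3 (by omega)).mpr hProt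
        rw [hA, hfP]
      · have hcond : ¬ (PySem.Chars.findFrom (t ++ t) t 1 ≤ 20 ∧
            2 * PySem.Chars.findFrom (t ++ t) t 1 ≤ (↑t.length : ℤ) ∧
            PySem.Int.mod (↑t.length) (PySem.Chars.findFrom (t ++ t) t 1) = 0) := by
          rw [hfP]
          rintro ⟨c1, c2, c3⟩
          apply hgood
          refine ⟨by exact_mod_cast c1, by exact_mod_cast c2, ?_⟩
          rw [pv_mod_cast] at c3
          exact Nat.dvd_of_mod_eq_zero (by exact_mod_cast c3)
        rw [if_neg hcond]
        have hA : collapseLoopA t (↑t.length) (PySem.List.pyRange 2 21) = none := by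
          apply pv_loopA_none
          intro u hu
          rw [PySem.List.mem_pyRange_one] at hu
          obtain ⟨m, rfl⟩ : ∃ m : ℕ, u = ↑m := ⟨u.toNat, (Int.toNat_of_nonneg (by omega)).symm⟩
          have hm2 : 2 ≤ m := by exact_mod_cast hu.1
          have hm20 : m ≤ 20 := by
            have : (↑m : ℤ) < 21 := hu.2
            omega
          by_cases hstop : PySem.Int.floordiv (↑t.length) 2 < (↑m : ℤ)
          · left; exact hstop
          · right
            by_cases hmod : PySem.Int.mod (↑t.length) (↑m : ℤ) = 0
            · right
              intro hhit
              have hmd : m ∣ t.length := by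
                rw [pv_mod_cast] at hmod
                exact Nat.dvd_of_mod_eq_zero (by exact_mod_cast hmod)
              have hrot := (pv_hit_iff_rotate t m (by omega) hmd (by omega)).mp hhit
              have hPm : P ∣ m := pv_period_dvd t P (by omega) hProt hPmin hPle m hrot
              have h2m : 2 * m ≤ t.length := by
                rw [show (PySem.Int.floordiv (↑t.length) 2) = ((t.length / 2 : ℕ) : ℤ) from by
                  exact_mod_cast pv_floordiv_cast t.length 2] at hstop
                have : m ≤ t.length / 2 := by exact_mod_cast not_lt.mp hstop
                omega
              have hPleM : P ≤ m := Nat.le_of_dvd (by omega) hPm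
              exact hgood ⟨by omega, by omega, hPm.trans hmd⟩
            · left; exact hmod
        rw [hA]
    · rw [if_neg hp2]
      have hP1' : P = 1 := by omega
      have hrot1 : t.rotate 1 = t := hP1' ▸ hProt
      obtain ⟨c, hc⟩ : ∃ c, t = List.replicate t.length c :=
        ⟨t.headI, pv_const_of_rotate_one t htne hrot1⟩
      have hloops := pv_uniform_loops c t.length hN4 (PySem.List.pyRange 2 21)
        (fun u hu => (PySem.List.mem_pyRange_one.mp hu).1)
        ((PySem.List.pairwise_lt_pyRange_one 2 21).imp (fun h => le_of_lt h))
      rw [show collapseLoopA t (↑t.length) (PySem.List.pyRange 2 21) =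
            collapseDivLoopB t (↑t.length) (PySem.List.pyRange 2 21) from by
        conv_lhs => rw [hc]
        conv_rhs => rw [hc]
        simpa using hloops]

-- ===== VERDICT (by name: the statement is the Claim_ definition above) =====
theorem collapse_repeated_token_spec : Claim_equal_collapse_repeated_token := by
  intro token _
  unfold Spec_collapse_repeated_token
  exact pv_main token
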